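-- pv_equiv track=rewrite | github.com/diogoerie/Tp2DR1 | tp2/questao06.py | contar_impares
-- ===== SOURCE A (Python) =====
-- def contar_impares(pilha):
--     contagem = 0
--     pilha_temporaria = []
--     impares = []
--     while pilha:
--         pedido = pilha.pop()
--         pilha_temporaria.append(pedido)
--         if pedido % 2 != 0:
--             contagem += 1
--             impares.append(pedido)
--     while pilha_temporaria:
--         pilha.append(pilha_temporaria.pop())
--     return contagem, impares
-- ===== SOURCE B (Python) =====
-- def contar_impares(pilha):
--     impares = [x for x in reversed(pilha) if x % 2 != 0]
--     return len(impares), impares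
-- ===== Notes on version B (the rewrite author's own statement) =====
-- stated objective: simpler
-- what changed: B replaces A's pop/temporary-stack/restore machinery with a single comprehension over reversed(pilha), never mutating the input and deriving the count as len(impares); dropping the per-element pop/append bookkeeping makes it measurably faster by a constant factor.
import Mathlib
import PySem

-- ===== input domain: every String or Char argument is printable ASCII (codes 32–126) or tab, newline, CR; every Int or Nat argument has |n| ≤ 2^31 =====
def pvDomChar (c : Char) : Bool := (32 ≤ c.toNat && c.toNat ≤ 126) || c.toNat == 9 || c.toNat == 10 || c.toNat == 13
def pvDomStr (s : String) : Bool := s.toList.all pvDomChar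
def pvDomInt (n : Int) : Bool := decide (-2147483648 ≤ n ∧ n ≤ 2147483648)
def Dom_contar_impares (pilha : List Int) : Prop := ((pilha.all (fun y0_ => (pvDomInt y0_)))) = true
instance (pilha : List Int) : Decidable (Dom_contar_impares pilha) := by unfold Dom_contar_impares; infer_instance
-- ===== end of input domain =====

-- B replaces A's pop/temporary-stack/restore loops with one filter over the reversed list (simpler, same O(n));
-- A mutates pilha but fully restores it, so the net side effect is none and only return values are compared.


-- ===== PORT A =====
-- the main `while pilha:` loop of A: pops the last element, pushes it on the temporary stack,
-- counts/collects it when odd. The final restore loop only rebuilds `pilha` from `pilha_temporaria`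
-- and does not touch the returned pair, so `temp` is threaded but unused in the result.
def contarImparesLoopA (pilha : List Int) (temp : List Int) (contagem : Int)
    (impares : List Int) : Int × List Int :=
  if h : pilha = [] then
    (contagem, impares)
  else
    let pedido := pilha.getLast h
    let rest := pilha.dropLast
    if PySem.Int.mod pedido 2 ≠ 0 then
      contarImparesLoopA rest (temp ++ [pedido]) (contagem + 1) (impares ++ [pedido])
    else
      contarImparesLoopA rest (temp ++ [pedido]) contagem impares
termination_by pilha.length
decreasing_by all_goals · have := List.length_pos_of_ne_nil h; simp only [List.length_dropLast]; omega

def contar_impares (pilha : List Int) : Int × List Int :=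
  contarImparesLoopA pilha [] 0 []

-- ===== PORT B =====
def contar_impares_alt (pilha : List Int) : Int × List Int :=
  let impares := pilha.reverse.filter (fun x => PySem.Int.mod x 2 ≠ 0)
  ((impares.length : Int), impares)

-- ===== PRECONDITION & SPEC =====
def Spec_contar_impares (pilha : List Int) (out : Int × List Int) : Prop := out = contar_impares_alt pilha
instance (pilha : List Int) (out : Int × List Int) : Decidable (Spec_contar_impares pilha out) := by unfold Spec_contar_impares; infer_instance

-- ===== CLAIM (what is proved, stated in full; the proofs are below) =====
def Claim_equal_contar_impares : Prop := ∀ (pilha : List Int), Dom_contar_impares pilha → Spec_contar_impares pilha (contar_impares pilha)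

-- ===== LEMMAS AND PROOFS =====

theorem contarImparesLoopA_eq (pilha : List Int) :
    ∀ (temp : List Int) (contagem : Int) (impares : List Int),
      contarImparesLoopA pilha temp contagem impares =
        (contagem + ((pilha.reverse.filter (fun x => PySem.Int.mod x 2 ≠ 0)).length : Int),
         impares ++ pilha.reverse.filter (fun x => PySem.Int.mod x 2 ≠ 0)) := by
  induction pilha using List.reverseRecOn with
  | nil => intro temp c imp; simp [contarImparesLoopA]
  | append_singleton l x ih =>
      intro temp c imp
      rw [contarImparesLoopA, dif_neg (by simp : ¬(l ++ [x] = []))]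
      simp only [List.getLast_concat, List.dropLast_concat, List.reverse_append,
        List.reverse_cons, List.reverse_nil, List.nil_append, List.singleton_append,
        List.filter_cons, ih]
      by_cases hp : PySem.Int.mod x 2 ≠ 0
      · rw [decide_eq_true hp, if_pos hp]
        simp only [if_true, List.length_cons, List.append_assoc, List.singleton_append,
          Prod.mk.injEq]
        exact ⟨by push_cast; ring, trivial⟩
      · rw [decide_eq_false hp, if_neg hp]
        simp only [Bool.false_eq_true, if_false]

-- ===== VERDICT (by name: the statement is the Claim_ definition above) =====
theorem contar_impares_spec : Claim_equal_contar_impares := by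
  intro pilha _
  unfold Spec_contar_impares contar_impares contar_impares_alt
  simp [contarImparesLoopA_eq]
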